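-- pv_equiv track=rewrite | github.com/Lednarrrr/LearningPython | BrainStimulatingProblems.py | has_no_repeats
-- ===== SOURCE A (Python) =====
-- def has_no_repeats(s):
--     i=0
--     formatted_s=s.replace(' ', '')
--     while(True):
--        if i>=len(formatted_s)-1:
--           break
--        elif formatted_s[i] is formatted_s[i+1]:
--           return False
--        else:
--           i+=1
--           continue
--
--     return True
-- ===== SOURCE B (Python) =====
-- from itertools import groupby
--
--
-- def has_no_repeats(s):
--     formatted = s.replace(' ', '')
--     return all(len(list(g)) == 1 for _, g in groupby(formatted))
-- ===== Notes on version B (the rewrite author's own statement) =====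
-- stated objective: idiomatic
-- what changed: Replaces the manual while-loop over indices testing adjacent characters for identity with itertools.groupby run-grouping: after stripping spaces, return True iff every maximal run of equal characters has length 1.
import Mathlib
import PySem

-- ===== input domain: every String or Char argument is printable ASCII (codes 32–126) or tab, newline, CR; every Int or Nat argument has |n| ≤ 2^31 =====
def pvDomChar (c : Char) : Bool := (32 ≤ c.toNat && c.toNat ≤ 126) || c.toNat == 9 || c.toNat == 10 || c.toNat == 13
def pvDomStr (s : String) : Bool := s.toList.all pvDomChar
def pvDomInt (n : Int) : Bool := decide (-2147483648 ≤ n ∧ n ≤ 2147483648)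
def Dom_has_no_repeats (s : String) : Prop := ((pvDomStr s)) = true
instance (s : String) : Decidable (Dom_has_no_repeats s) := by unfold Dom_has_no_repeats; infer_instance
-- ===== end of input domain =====

-- B strips spaces and checks via run-grouping (groupby) that every maximal run has length 1,
-- instead of A's manual index loop comparing adjacent characters (objective: idiomatic).
-- On the printable-ASCII domain Python's identity test on 1-char strings coincides with equality (interning).

-- ===== PORT A =====
-- A's while-loop: index i, stop when i ≥ len-1 (stated equivalently over Nat as len ≤ i+1),
-- return False when formatted[i] equals formatted[i+1].
def hnrLoopA (l : List Char) (i : Nat) : Bool :=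
  if l.length ≤ i + 1 then true
  else if l[i]? == l[i + 1]? then false
  else hnrLoopA l (i + 1)
termination_by l.length - i

def has_no_repeats (s : String) : Bool :=
  hnrLoopA ((PySem.Str.replace s " " "").toList) 0

-- ===== PORT B =====
def has_no_repeats_alt (s : String) : Bool :=
  (((PySem.Str.replace s " " "").toList).splitBy (· == ·)).all (fun g => g.length == 1)

-- ===== PRECONDITION & SPEC =====
def Spec_has_no_repeats (s : String) (out : Bool) : Prop := out = has_no_repeats_alt s
instance (s : String) (out : Bool) : Decidable (Spec_has_no_repeats s out) := by unfold Spec_has_no_repeats; infer_instance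

-- ===== CLAIM (what is proved, stated in full; the proofs are below) =====
def Claim_equal_has_no_repeats : Prop := ∀ (s : String), Dom_has_no_repeats s → Spec_has_no_repeats s (has_no_repeats s)

-- ===== LEMMAS AND PROOFS =====

-- proof-side characterisation: no two adjacent characters equal
def adjOK : List Char → Bool
  | [] => true
  | [_] => true
  | a :: b :: t => !(a == b) && adjOK (b :: t)

theorem hnrLoopA_tail : ∀ (n : ℕ) (l : List Char) (i : ℕ), l.length - i ≤ n →
    hnrLoopA l (i + 1) = hnrLoopA l.tail i := by
  intro n
  induction n with
  | zero =>
    intro l i h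
    unfold hnrLoopA
    have h1 : l.length ≤ i + 1 + 1 := by omega
    have h2 : l.tail.length ≤ i + 1 := by simp only [List.length_tail]; omega
    simp [h1]
  | succ n ih =>
    intro l i h
    cases l with
    | nil => simp [hnrLoopA]
    | cons a t =>
      simp only [List.tail_cons]
      unfold hnrLoopA
      by_cases hc : t.length ≤ i + 1
      · have h1 : (a :: t).length ≤ i + 1 + 1 := by simp only [List.length_cons]; omega
        simp [hc]
      · have h1 : ¬ (a :: t).length ≤ i + 1 + 1 := by simp only [List.length_cons]; omega
        have g1 : (a :: t)[i + 1]? = t[i]? := by simp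
        have g2 : (a :: t)[i + 1 + 1]? = t[i + 1]? := by simp
        simp only [h1, hc, if_false, g1, g2]
        split
        · rfl
        · exact ih (a :: t) (i + 1) (by simp only [List.length_cons] at h ⊢; omega)

theorem hnrLoopA_eq_adjOK : ∀ (l : List Char), hnrLoopA l 0 = adjOK l := by
  intro l
  induction l with
  | nil => simp [hnrLoopA, adjOK]
  | cons a t ih =>
    cases t with
    | nil => simp [hnrLoopA, adjOK]
    | cons b u =>
      unfold hnrLoopA
      have h1 : ¬ (a :: b :: u).length ≤ 0 + 1 := by simp
      simp only [h1, if_false]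
      have h2 : hnrLoopA (a :: b :: u) (0 + 1) = hnrLoopA (b :: u) 0 :=
        hnrLoopA_tail (a :: b :: u).length (a :: b :: u) 0 (by omega)
      by_cases hab : a = b
      · simp [adjOK, hab]
      · have hg : ((a :: b :: u)[0]? == (a :: b :: u)[0 + 1]?) = false := by
          simp [hab]
        simp only [hg, h2, ih, adjOK]
        simp [hab]

theorem adjOK_iff_isChain (l : List Char) : adjOK l = true ↔ l.IsChain (· ≠ ·) := by
  induction l with
  | nil => simp [adjOK]
  | cons a t ih =>
    cases t with
    | nil => simp [adjOK]
    | cons b u =>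
      rw [List.isChain_cons, ← ih]
      simp only [adjOK, Bool.and_eq_true, beq_eq_false_iff_ne, Bool.not_eq_eq_eq_not,
        Bool.not_true]
      constructor
      · rintro ⟨hab, h⟩
        refine ⟨?_, h⟩
        intro y hy
        simp only [List.head?_cons, Option.mem_def, Option.some.injEq] at hy
        subst hy
        simpa using hab
      · rintro ⟨hab, h⟩
        exact ⟨by simpa using hab b (by simp), h⟩

theorem eq_map_singleton {α : Type} {gs : List (List α)} (h : ∀ g ∈ gs, g.length = 1) :
    gs = gs.flatten.map (fun a => [a]) := by
  induction gs with
  | nil => rfl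
  | cons g gs ih =>
    obtain ⟨a, rfl⟩ : ∃ a, g = [a] := by
      have := h g (List.mem_cons_self)
      match g with
      | [x] => exact ⟨x, rfl⟩
    simp only [List.flatten_cons, List.map_append, List.map_cons]
    rw [← ih (fun g hg => h g (List.mem_cons_of_mem _ hg))]
    rfl

theorem flatten_map_singleton {α : Type} (l : List α) :
    (l.map (fun a => [a])).flatten = l := by
  induction l with
  | nil => rfl
  | cons a t ih => simp [ih]

theorem splitBy_all_singleton_iff (l : List Char) :
    (((l.splitBy (· == ·)).all (fun g => g.length == 1)) = true) ↔ l.IsChain (· ≠ ·) := by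
  constructor
  · intro h
    have hlen : ∀ g ∈ l.splitBy (· == ·), g.length = 1 := by
      intro g hg
      simpa using List.all_eq_true.1 h g hg
    have hmap : l.splitBy (· == ·) = l.map (fun a => [a]) := by
      have := eq_map_singleton hlen
      rwa [List.flatten_splitBy] at this
    have hc := List.isChain_getLast_head_splitBy (· == ·) l
    rw [hmap, List.isChain_map] at hc
    refine hc.imp ?_
    intro a b hab
    obtain ⟨_, _, H⟩ := hab
    simpa using H
  · intro h
    have hmap : l.splitBy (· == ·) = l.map (fun a => [a]) := by
      have := List.splitBy_flatten (r := (· == ·)) (l := l.map (fun a => [a]))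
        (by simp)
        (by intro m hm
            obtain ⟨a, _, rfl⟩ := List.mem_map.1 hm
            exact List.isChain_singleton a)
        (by rw [List.isChain_map]
            refine h.imp ?_
            intro a b hab
            exact ⟨by simp, by simp, by simpa using hab⟩)
      rwa [flatten_map_singleton] at this
    rw [hmap]
    simp

theorem bAll_eq_adjOK (l : List Char) :
    ((l.splitBy (· == ·)).all (fun g => g.length == 1)) = adjOK l := by
  have h := (splitBy_all_singleton_iff l).trans (adjOK_iff_isChain l).symm
  rw [Bool.eq_iff_iff]
  exact h

-- ===== VERDICT (by name: the statement is the Claim_ definition above) =====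
theorem has_no_repeats_spec : Claim_equal_has_no_repeats := by
  intro s _
  unfold Spec_has_no_repeats has_no_repeats has_no_repeats_alt
  rw [hnrLoopA_eq_adjOK, bAll_eq_adjOK]
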